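-- pv_equiv track=rewrite | github.com/JianmingChen/LeetCode_Data_Structure | Candy_Maze.py | candy_maze
-- ===== SOURCE A (Python) =====
-- def candy_maze(candy_map: list[list[int]]) -> int:
--     """
--     计算在小华先走后，小为能吃到的最大糖果数
--
--     Args:
--         candy_map: 2行m列的糖果迷宫，每个位置表示糖果数量
--
--     Returns:
--         int: 小为能吃到的最大糖果数
--
--     解题思路：
--     1. 首先计算小华的最优路径（使小为能拿到的糖果最少）
--     2. 标记小华经过的路径，将这些位置的糖果置为0
--     3. 在剩余的糖果中，计算小为能获得的最大糖果数
--     """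
--     if not candy_map or not candy_map[0]:
--         return 0
--
--     rows, cols = 2, len(candy_map[0])
--
--     def find_min_remaining_path(curr_map):
--         """
--         使用动态规划找到一条路径，使得剩余可获得的最大糖果数最小
--         返回路径和对应的最小值
--         """
--         # dp[i][j] 存储从(i,j)到终点的最小剩余糖果数
--         dp = [[float('inf')] * cols for _ in range(rows)]
--         # path[i][j] 存储从(i,j)到终点的最优路径的下一步
--         path = [[None] * cols for _ in range(rows)]
--
--         # 初始化终点
--         dp[1][cols-1] = curr_map[1][cols-1]
--
--         # 从右到左，从下到上填充dp表
--         for j in range(cols-1, -1, -1):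
--             for i in range(rows-1, -1, -1):
--                 if i == 1 and j == cols-1:
--                     continue
--
--                 # 计算向右走的情况
--                 if j < cols-1:
--                     right = dp[i][j+1] + curr_map[i][j]
--                     if right < dp[i][j]:
--                         dp[i][j] = right
--                         path[i][j] = (i, j+1)
--
--                 # 计算向下走的情况
--                 if i < rows-1:
--                     down = dp[i+1][j] + curr_map[i][j]
--                     if down < dp[i][j]:
--                         dp[i][j] = down
--                         path[i][j] = (i+1, j)
--
--         return dp[0][0], path
--
--     def mark_path(path, start):
--         """标记路径，返回新的糖果地图"""
--         new_map = [row[:] for row in candy_map]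
--         curr = start
--         while curr:
--             i, j = curr
--             new_map[i][j] = 0  # 将路径上的糖果置为0
--             if path[i][j]:
--                 curr = path[i][j]
--             else:
--                 break
--         return new_map
--
--     def find_max_path(curr_map):
--         """找到能获得最大糖果数的路径"""
--         dp = [[0] * cols for _ in range(rows)]
--
--         # 初始化第一个位置
--         dp[0][0] = curr_map[0][0]
--
--         # 初始化第一行
--         for j in range(1, cols):
--             dp[0][j] = dp[0][j-1] + curr_map[0][j]
--
--         # 初始化第一列
--         for i in range(1, rows):
--             dp[i][0] = dp[i-1][0] + curr_map[i][0]
--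
--         # 填充dp表
--         for i in range(1, rows):
--             for j in range(1, cols):
--                 dp[i][j] = max(dp[i-1][j], dp[i][j-1]) + curr_map[i][j]
--
--         return dp[1][cols-1]
--
--     # 1. 找到小华的最优路径（使剩余可得糖果最小的路径）
--     _, first_path = find_min_remaining_path(candy_map)
--
--     # 2. 标记小华的路径，创建新的糖果地图
--     remaining_map = mark_path(first_path, (0, 0))
--
--     # 3. 在剩余糖果中找到小为能获得的最大值
--     max_candies = find_max_path(remaining_map)
--
--     return max_candies
-- ===== SOURCE B (Python) =====
-- def candy_maze(candy_map: list[list[int]]) -> int: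
--     """Prefix/suffix-sum reformulation: a monotone path in a 2-row maze is
--     determined by its drop column; Hua takes the last column minimizing
--     prefix0+suffix1, those cells are zeroed, Wei takes the max over drop
--     columns of the zeroed map."""
--     if not candy_map or not candy_map[0]:
--         return 0
--     r0 = candy_map[0]
--     cols = len(r0)
--     r1 = candy_map[1][:cols]
--     # suffix sums of r1: suf1[j] = sum(r1[j:])
--     suf1 = [0] * (cols + 1)
--     for j in range(cols - 1, -1, -1):
--         suf1[j] = suf1[j + 1] + r1[j]
--     # Hua's drop column: last argmin of f(j) = sum(r0[:j+1]) + suf1[j]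
--     best = None
--     k = 0
--     pre = 0
--     for j in range(cols):
--         pre += r0[j]
--         v = pre + suf1[j]
--         if best is None or v <= best:
--             best = v
--             k = j
--     # zero Hua's path
--     s0 = [0] * (k + 1) + r0[k + 1:]
--     s1 = r1[:k] + [0] * (cols - k)
--     # Wei's answer: max over drop columns of prefix(s0)+suffix(s1)
--     suf = [0] * (cols + 1)
--     for j in range(cols - 1, -1, -1):
--         suf[j] = suf[j + 1] + s1[j]
--     ans = None
--     pre = 0
--     for j in range(cols):
--         pre += s0[j]
--         v = pre + suf[j]
--         if ans is None or v > ans: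
--             ans = v
--     return ans
-- ===== Notes on version B (the rewrite author's own statement) =====
-- stated objective: simpler
-- what changed: Replaces the two DP tables plus path reconstruction with prefix/suffix sums over the drop column: Hua's path is the last argmin of prefix0+suffix1, its cells are zeroed, and Wei's answer is the max of the same functional on the zeroed rows.
import Mathlib
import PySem

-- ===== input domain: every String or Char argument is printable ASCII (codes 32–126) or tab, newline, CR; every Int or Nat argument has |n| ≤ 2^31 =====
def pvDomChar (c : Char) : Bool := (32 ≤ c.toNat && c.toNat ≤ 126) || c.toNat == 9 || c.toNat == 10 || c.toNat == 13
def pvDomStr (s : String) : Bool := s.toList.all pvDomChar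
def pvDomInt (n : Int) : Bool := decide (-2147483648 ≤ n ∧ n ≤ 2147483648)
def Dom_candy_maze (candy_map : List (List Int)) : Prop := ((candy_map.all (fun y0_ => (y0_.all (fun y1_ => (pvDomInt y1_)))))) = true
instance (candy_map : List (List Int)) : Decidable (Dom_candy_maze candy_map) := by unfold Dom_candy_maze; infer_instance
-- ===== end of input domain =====

-- B replaces A's DP tables + path reconstruction by prefix/suffix sums over the drop column (objective: simpler).


-- ===== PORT A =====
-- float('inf') is modelled by `none`; pvAddInf / pvLtInf are Python's + and < on {number, inf}.
def pvAddInf : Option Int → Int → Option Int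
  | some v, c => some (v + c)
  | none, _ => none

def pvLtInf : Option Int → Option Int → Bool
  | some a, some b => a < b
  | some _, none => true
  | none, _ => false

-- find_min_remaining_path: the j-loop runs right-to-left, so it is the structural
-- recursion on the column lists; per column the inner i-loop body is written out for
-- i = 1 then i = 0 (rows == 2 is a constant in A).  Returns (dp[0][j], dp[1][j],
-- flags: flags[t] = true iff path[0][t] was set to the downward step).
def pvMinDP : List Int → List Int → Option Int × Option Int × List Bool
  | [a], b :: _ =>
      -- j = cols-1: dp[1][cols-1] initialised to b; cell (1,cols-1) skipped;
      -- cell (0,cols-1): only the down-step is examined, down = dp[1][j] + a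
      let dp1 : Option Int := some b
      let down := pvAddInf dp1 a
      let dp0 := if pvLtInf down none then down else none
      (dp0, dp1, [pvLtInf down none])
  | a :: r0, b :: r1 =>
      let r := pvMinDP r0 r1
      let d0 := r.1
      let d1 := r.2.1
      let cs := r.2.2
      -- i = 1: right = dp[1][j+1] + b
      let right1 := pvAddInf d1 b
      let dp1 := if pvLtInf right1 none then right1 else none
      -- i = 0: right = dp[0][j+1] + a, then down = dp[1][j] + a
      let right0 := pvAddInf d0 a
      let dp0r := if pvLtInf right0 none then right0 else none
      let down0 := pvAddInf dp1 a
      if pvLtInf down0 dp0r then (down0, dp1, true :: cs)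
      else (dp0r, dp1, false :: cs)
  | _, _ => (none, none, [])

-- mark_path: walk from (0,0) following the stored next-steps, zeroing visited cells.
-- While the flag is false the path moves right on row 0; at the first true flag it
-- drops, and on row 1 every following path[1][j] is the right-step to the end.
def pvMark : List Bool → List Int → List Int → List Int × List Int
  | true :: _, _ :: r0, r1 => (0 :: r0, r1.map (fun _ => 0))
  | false :: cs, _ :: r0, b :: r1 =>
      let r := pvMark cs r0 r1
      (0 :: r.1, b :: r.2)
  | _, r0, r1 => (r0, r1)

-- find_max_path: dp[0] is the running prefix-sum row …
def pvPrefix : Int → List Int → List Int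
  | _, [] => []
  | acc, x :: xs => (acc + x) :: pvPrefix (acc + x) xs

-- … and the dp[1] loop: dp[1][j] = max(dp[0][j], dp[1][j-1]) + m[1][j]
def pvMaxLoop : Int → List (Int × Int) → Int
  | d, [] => d
  | d, (p, b) :: t => pvMaxLoop (max p d + b) t

def pvFindMax (s0 s1 : List Int) : Int :=
  match pvPrefix 0 s0, s1 with
  | p0 :: pt, b0 :: bt => pvMaxLoop (p0 + b0) (pt.zip bt)
  | _, _ => 0   -- unreachable: cols ≥ 1

def candy_maze (candy_map : List (List Int)) : Int :=
  match candy_map with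
  | [] => 0
  | [] :: _ => 0
  | row0 :: rest =>
      let cols := row0.length
      -- only indices j < cols of row 1 are ever read
      let row1 := (rest.headD []).take cols
      let r := pvMinDP row0 row1
      let m := pvMark r.2.2 row0 row1
      pvFindMax m.1 m.2

-- ===== PORT B =====
-- suffix sums: pvSuf l has length l.length + 1, entry j = sum l[j:]
def pvSuf : List Int → List Int
  | [] => [0]
  | x :: xs =>
      let s := pvSuf xs
      (x + s.headD 0) :: s

-- Hua's drop column: last argmin of v_j = prefix0[j] + suf1[j]
def pvArgminLoop : List (Int × Int) → Option Int → Int → Int → Int → Int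
  | [], _, k, _, _ => k
  | (a, s) :: t, best, k, pre, j =>
      let pre' := pre + a
      let v := pre' + s
      match best with
      | none => pvArgminLoop t (some v) j pre' (j + 1)
      | some b =>
          if v ≤ b then pvArgminLoop t (some v) j pre' (j + 1)
          else pvArgminLoop t (some b) k pre' (j + 1)

-- Wei's answer: max of v_j = prefix(s0)[j] + suf(s1)[j]
def pvMaxLoopB : List (Int × Int) → Option Int → Int → Int
  | [], ans, _ => ans.getD 0
  | (a, s) :: t, ans, pre =>
      let pre' := pre + a
      let v := pre' + s
      match ans with
      | none => pvMaxLoopB t (some v) pre'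
      | some b =>
          if v > b then pvMaxLoopB t (some v) pre' else pvMaxLoopB t (some b) pre'

def candy_maze_alt (candy_map : List (List Int)) : Int :=
  match candy_map with
  | [] => 0
  | [] :: _ => 0
  | row0 :: rest =>
      let cols := row0.length
      let r1 := (rest.headD []).take cols
      let k := pvArgminLoop (row0.zip (pvSuf r1)) none 0 0 0
      let s0 := List.replicate (k.toNat + 1) 0 ++ row0.drop (k.toNat + 1)
      let s1 := r1.take k.toNat ++ List.replicate (cols - k.toNat) 0
      pvMaxLoopB (s0.zip (pvSuf s1)) none 0

-- ===== PRECONDITION & SPEC =====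
-- Pre_ excludes only inputs on which A raises IndexError: a nonempty first row with
-- no second row, or a second row shorter than the first (curr_map[1][j] out of range).
def Pre_candy_maze (candy_map : List (List Int)) : Prop :=
  candy_map = [] ∨ candy_map.headD [] = [] ∨
    (candy_map.tail ≠ [] ∧ (candy_map.headD []).length ≤ (candy_map.tail.headD []).length)

instance (candy_map : List (List Int)) : Decidable (Pre_candy_maze candy_map) := by
  unfold Pre_candy_maze; infer_instance

def pvWitness_candy_maze : List (List Int) := [[1, 2, 3], [4, 5, 6]]

def Spec_candy_maze (candy_map : List (List Int)) (out : Int) : Prop := out = candy_maze_alt candy_map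
instance (candy_map : List (List Int)) (out : Int) : Decidable (Spec_candy_maze candy_map out) := by unfold Spec_candy_maze; infer_instance

-- ===== CLAIM (what is proved, stated in full; the proofs are below) =====
def Claim_equal_candy_maze : Prop := ∀ (candy_map : List (List Int)), Dom_candy_maze candy_map → Pre_candy_maze candy_map → Spec_candy_maze candy_map (candy_maze candy_map)

-- ===== LEMMAS AND PROOFS =====

-- f-values: pvF r0 r1, entry k = sum r0[0..k] + sum r1[k..]  (both programs optimise this list)
def pvF : List Int → List Int → List Int
  | a :: r0, b :: r1 => (a + b + r1.sum) :: (pvF r0 r1).map (a + ·)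
  | _, _ => []

def pvMinL : List Int → Int
  | [] => 0
  | [x] => x
  | x :: xs => min x (pvMinL xs)

def pvMaxL : List Int → Int
  | [] => 0
  | [x] => x
  | x :: xs => max x (pvMaxL xs)

-- last argmin of a list
def pvLA : List Int → Nat
  | [] => 0
  | [_] => 0
  | x :: xs => if x < pvMinL xs then 0 else pvLA xs + 1

-- A's drop flags, expressed on the f-values
def pvFlags : List Int → List Bool
  | [] => []
  | [_] => [true]
  | x :: xs => decide (x < pvMinL xs) :: pvFlags xs

theorem pvF_length : ∀ (r0 r1 : List Int), r0.length = r1.length → (pvF r0 r1).length = r0.length := by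
  intro r0
  induction r0 with
  | nil => intro r1 _; cases r1 <;> simp [pvF]
  | cons a r0 ih =>
    intro r1 h
    cases r1 with
    | nil => simp at h
    | cons b r1 => simp [pvF, ih r1 (by simpa using h)]

theorem pvF_ne_nil (r0 r1 : List Int) (h : r0.length = r1.length) (hne : r0 ≠ []) :
    pvF r0 r1 ≠ [] := by
  have := pvF_length r0 r1 h
  intro hc
  rw [hc] at this
  cases r0 with
  | nil => exact hne rfl
  | cons a t => simp at this

theorem pvMinL_map_add (c : Int) : ∀ (l : List Int), l ≠ [] → pvMinL (l.map (c + ·)) = c + pvMinL l := by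
  intro l
  induction l with
  | nil => simp
  | cons x xs ih =>
    intro _
    cases xs with
    | nil => simp [pvMinL]
    | cons y ys =>
      have hih := ih (by simp)
      simp only [List.map_cons] at hih ⊢
      show min (c + x) (pvMinL (((y :: ys).map (c + ·)))) = c + min x (pvMinL (y :: ys))
      simp only [List.map_cons] at hih ⊢
      rw [hih]
      omega

theorem pvLA_map_add (c : Int) : ∀ (l : List Int), pvLA (l.map (c + ·)) = pvLA l := by
  intro l
  induction l with
  | nil => simp [pvLA]
  | cons x xs ih =>
    cases xs with
    | nil => simp [pvLA]
    | cons y ys =>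
      have hm := pvMinL_map_add c (y :: ys) (by simp)
      show pvLA ((c + x) :: ((y :: ys).map (c + ·))) = pvLA (x :: y :: ys)
      have h1 : ∀ (u : Int) (v vs : Int) (w ws : List Int),
          pvLA (u :: v :: w) = if u < pvMinL (v :: w) then 0 else pvLA (v :: w) + 1 := by
        intro u v vs w ws; rfl
      cases hmap : (y :: ys).map (c + ·) with
      | nil => simp at hmap
      | cons z zs =>
        rw [← hmap]
        have : pvLA ((c + x) :: (y :: ys).map (c + ·)) =
            if (c + x) < pvMinL ((y :: ys).map (c + ·)) then 0 else pvLA ((y :: ys).map (c + ·)) + 1 := by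
          rw [hmap]; rfl
        rw [this, hm, ih]
        show _ = pvLA (x :: y :: ys)
        have : pvLA (x :: y :: ys) = if x < pvMinL (y :: ys) then 0 else pvLA (y :: ys) + 1 := rfl
        rw [this]
        by_cases hx : x < pvMinL (y :: ys)
        · rw [if_pos (by omega), if_pos hx]
        · rw [if_neg (by omega), if_neg hx]

theorem pvFlags_map_add (c : Int) : ∀ (l : List Int), pvFlags (l.map (c + ·)) = pvFlags l := by
  intro l
  induction l with
  | nil => simp [pvFlags]
  | cons x xs ih =>
    cases xs with
    | nil => simp [pvFlags]
    | cons y ys =>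
      have hm := pvMinL_map_add c (y :: ys) (by simp)
      have h1 : pvFlags ((c + x) :: (y :: ys).map (c + ·)) =
          decide ((c + x) < pvMinL ((y :: ys).map (c + ·))) :: pvFlags ((y :: ys).map (c + ·)) := by
        cases hmap : (y :: ys).map (c + ·) with
        | nil => simp at hmap
        | cons z zs => rw [← hmap]; rw [hmap]; rfl
      show pvFlags ((c + x) :: (y :: ys).map (c + ·)) = pvFlags (x :: y :: ys)
      rw [h1, hm, ih]
      have h2 : pvFlags (x :: y :: ys) = decide (x < pvMinL (y :: ys)) :: pvFlags (y :: ys) := rfl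
      rw [h2]
      congr 1
      simp only [decide_eq_decide]
      omega

theorem pvLA_lt_length : ∀ (l : List Int), l ≠ [] → pvLA l < l.length := by
  intro l
  induction l with
  | nil => simp
  | cons x xs ih =>
    intro _
    cases xs with
    | nil => simp [pvLA]
    | cons y ys =>
      have h1 : pvLA (x :: y :: ys) = if x < pvMinL (y :: ys) then 0 else pvLA (y :: ys) + 1 := rfl
      rw [h1]
      have := ih (by simp)
      split <;> simp <;> simpa using this

theorem pvSuf_headD : ∀ (l : List Int), (pvSuf l).headD 0 = l.sum := by
  intro l
  induction l with
  | nil => simp [pvSuf]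
  | cons x xs ih => simp [pvSuf, List.headD_eq_head?_getD] at ih ⊢; simp [ih]

theorem pvSuf_cons (x : Int) (xs : List Int) : pvSuf (x :: xs) = (x + xs.sum) :: pvSuf xs := by
  have := pvSuf_headD xs
  simp only [pvSuf]
  rw [this]

theorem pvMinL_cons (x : Int) (l : List Int) (h : l ≠ []) : pvMinL (x :: l) = min x (pvMinL l) := by
  cases l with
  | nil => exact absurd rfl h
  | cons y ys => rfl

theorem pvMaxL_cons (x : Int) (l : List Int) (h : l ≠ []) : pvMaxL (x :: l) = max x (pvMaxL l) := by
  cases l with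
  | nil => exact absurd rfl h
  | cons y ys => rfl

theorem pvLA_cons (x : Int) (l : List Int) (h : l ≠ []) :
    pvLA (x :: l) = if x < pvMinL l then 0 else pvLA l + 1 := by
  cases l with
  | nil => exact absurd rfl h
  | cons y ys => rfl

theorem pvFlags_cons (x : Int) (l : List Int) (h : l ≠ []) :
    pvFlags (x :: l) = decide (x < pvMinL l) :: pvFlags l := by
  cases l with
  | nil => exact absurd rfl h
  | cons y ys => rfl

-- A's DP computes (min f, sum row1, flags f)
theorem pvMinDP_spec : ∀ (r0 r1 : List Int), r0.length = r1.length → r0 ≠ [] →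
    pvMinDP r0 r1 = (some (pvMinL (pvF r0 r1)), some r1.sum, pvFlags (pvF r0 r1)) := by
  intro r0
  induction r0 with
  | nil => intro r1 _ h; exact absurd rfl h
  | cons a r0 ih =>
    intro r1 hlen _
    cases r1 with
    | nil => simp at hlen
    | cons b r1 =>
      cases r0 with
      | nil =>
        cases r1 with
        | cons c cs => simp at hlen
        | nil =>
          simp [pvMinDP, pvF, pvMinL, pvFlags, pvAddInf, pvLtInf]
          omega
      | cons a2 r0t =>
        cases r1 with
        | nil => simp at hlen
        | cons b2 r1t =>
          have hlen' : (a2 :: r0t).length = (b2 :: r1t).length := by simpa using hlen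
          have hih := ih (b2 :: r1t) hlen' (by simp)
          have hFne : pvF (a2 :: r0t) (b2 :: r1t) ≠ [] := pvF_ne_nil _ _ hlen' (by simp)
          have hmapne : (pvF (a2 :: r0t) (b2 :: r1t)).map (a + ·) ≠ [] := by
            simpa using hFne
          have hF : pvF (a :: a2 :: r0t) (b :: b2 :: r1t)
              = (a + b + (b2 :: r1t).sum) :: (pvF (a2 :: r0t) (b2 :: r1t)).map (a + ·) := rfl
          simp only [pvMinDP, hih]
          rw [hF, pvMinL_cons _ _ hmapne, pvFlags_cons _ _ hmapne,
              pvMinL_map_add a _ hFne, pvFlags_map_add]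
          simp only [pvAddInf, pvLtInf, if_true]
          split_ifs with hc <;>
            simp only [decide_eq_true_eq, List.sum_cons] at hc <;>
            simp only [Prod.mk.injEq, Option.some.injEq, List.sum_cons] <;>
            refine ⟨?_, ?_, ?_⟩ <;>
              first
                | omega
                | (congr 1; symm; simp only [decide_eq_true_eq]; omega)
                | (congr 1; symm; simp only [decide_eq_false_iff_not]; omega)
                | rfl

-- walking A's path zeroes row0[0..k] and row1[k..], k = last argmin of the f-values
theorem pvMark_spec : ∀ (r0 r1 : List Int), r0.length = r1.length → r0 ≠ [] →
    pvMark (pvFlags (pvF r0 r1)) r0 r1 =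
      (List.replicate (pvLA (pvF r0 r1) + 1) 0 ++ r0.drop (pvLA (pvF r0 r1) + 1),
       r1.take (pvLA (pvF r0 r1)) ++ List.replicate (r1.length - pvLA (pvF r0 r1)) 0) := by
  intro r0
  induction r0 with
  | nil => intro r1 _ h; exact absurd rfl h
  | cons a r0 ih =>
    intro r1 hlen _
    cases r1 with
    | nil => simp at hlen
    | cons b r1 =>
      cases r0 with
      | nil =>
        cases r1 with
        | cons c cs => simp at hlen
        | nil => simp [pvF, pvFlags, pvLA, pvMark]
      | cons a2 r0t =>
        cases r1 with
        | nil => simp at hlen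
        | cons b2 r1t =>
          have hlen' : (a2 :: r0t).length = (b2 :: r1t).length := by simpa using hlen
          have hFne : pvF (a2 :: r0t) (b2 :: r1t) ≠ [] := pvF_ne_nil _ _ hlen' (by simp)
          have hmapne : (pvF (a2 :: r0t) (b2 :: r1t)).map (a + ·) ≠ [] := by simpa using hFne
          have hF : pvF (a :: a2 :: r0t) (b :: b2 :: r1t)
              = (a + b + (b2 :: r1t).sum) :: (pvF (a2 :: r0t) (b2 :: r1t)).map (a + ·) := rfl
          rw [hF, pvFlags_cons _ _ hmapne, pvLA_cons _ _ hmapne, pvFlags_map_add,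
              pvMinL_map_add a _ hFne, pvLA_map_add]
          by_cases hc : a + b + (b2 :: r1t).sum < a + pvMinL (pvF (a2 :: r0t) (b2 :: r1t))
          · rw [if_pos hc]
            simp only [hc, decide_true]
            simp [pvMark, List.map_const', List.replicate_succ]
          · rw [if_neg hc]
            simp only [hc, decide_false]
            have hrec := ih (b2 :: r1t) hlen' (by simp)
            simp only [pvMark, hrec, Prod.mk.injEq]
            refine ⟨?_, ?_⟩
            · simp [List.replicate_succ]
            · simp [List.take_succ_cons]

-- A's max DP computes max f on the zeroed rows
theorem pvMaxLoop_spec : ∀ (u v : List Int), u.length = v.length → ∀ (c d : Int), u ≠ [] →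
    pvMaxLoop d ((pvPrefix c u).zip v) = max (d + v.sum) (pvMaxL ((pvF u v).map (c + ·))) := by
  intro u
  induction u with
  | nil => intro v _ c d h; exact absurd rfl h
  | cons a u ih =>
    intro v hlen c d _
    cases v with
    | nil => simp at hlen
    | cons b v =>
      cases u with
      | nil =>
        cases v with
        | cons c2 cs => simp at hlen
        | nil =>
          have hz : (pvPrefix c [a]).zip [b] = [(c + a, b)] := by simp [pvPrefix]
          rw [hz]
          show max (c + a) d + b = _
          simp [pvF, pvMaxL]
          omega
      | cons a2 ut =>
        cases v with
        | nil => simp at hlen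
        | cons b2 vt =>
          have hlen' : (a2 :: ut).length = (b2 :: vt).length := by simpa using hlen
          have hFne : pvF (a2 :: ut) (b2 :: vt) ≠ [] := pvF_ne_nil _ _ hlen' (by simp)
          have hF : pvF (a :: a2 :: ut) (b :: b2 :: vt)
              = (a + b + (b2 :: vt).sum) :: (pvF (a2 :: ut) (b2 :: vt)).map (a + ·) := rfl
          have hmm : ((pvF (a2 :: ut) (b2 :: vt)).map (a + ·)).map (c + ·)
              = (pvF (a2 :: ut) (b2 :: vt)).map ((c + a) + ·) := by
            simp [List.map_map, Function.comp_def, add_assoc]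
          have hmapne : ((pvF (a2 :: ut) (b2 :: vt)).map (a + ·)).map (c + ·) ≠ [] := by
            simpa using hFne
          show pvMaxLoop d (((c + a) :: pvPrefix (c + a) (a2 :: ut)).zip (b :: b2 :: vt))
              = max (d + (b :: b2 :: vt).sum) (pvMaxL ((pvF (a :: a2 :: ut) (b :: b2 :: vt)).map (c + ·)))
          rw [hF]
          simp only [List.zip_cons_cons, pvMaxLoop, List.map_cons]
          rw [ih (b2 :: vt) hlen' (c + a) (max (c + a) d + b) (by simp),
              pvMaxL_cons _ _ hmapne, hmm]
          simp only [List.sum_cons]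
          omega

theorem pvFindMax_spec : ∀ (s0 s1 : List Int), s0.length = s1.length → s0 ≠ [] →
    pvFindMax s0 s1 = pvMaxL (pvF s0 s1) := by
  intro s0 s1 hlen hne
  cases s0 with
  | nil => exact absurd rfl hne
  | cons a t =>
    cases s1 with
    | nil => simp at hlen
    | cons b vt =>
      cases t with
      | nil =>
        cases vt with
        | cons c2 cs => simp at hlen
        | nil =>
          simp [pvFindMax, pvPrefix, pvF, pvMaxL, pvMaxLoop]
      | cons a2 t2 =>
        cases vt with
        | nil => simp at hlen
        | cons b2 vt2 =>
          have hlen' : (a2 :: t2).length = (b2 :: vt2).length := by simpa using hlen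
          have hFne : pvF (a2 :: t2) (b2 :: vt2) ≠ [] := pvF_ne_nil _ _ hlen' (by simp)
          have hmapne : (pvF (a2 :: t2) (b2 :: vt2)).map (a + ·) ≠ [] := by simpa using hFne
          have hF : pvF (a :: a2 :: t2) (b :: b2 :: vt2)
              = (a + b + (b2 :: vt2).sum) :: (pvF (a2 :: t2) (b2 :: vt2)).map (a + ·) := rfl
          show pvMaxLoop ((0 + a) + b) ((pvPrefix (0 + a) (a2 :: t2)).zip (b2 :: vt2))
              = pvMaxL (pvF (a :: a2 :: t2) (b :: b2 :: vt2))
          rw [pvMaxLoop_spec _ _ hlen' (0 + a) ((0 + a) + b) (by simp),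
              hF, pvMaxL_cons _ _ hmapne]
          have h0 : ((pvF (a2 :: t2) (b2 :: vt2)).map ((0 + a) + ·))
              = (pvF (a2 :: t2) (b2 :: vt2)).map (a + ·) := by simp
          rw [h0]
          simp only [List.sum_cons]
          omega

-- B's first loop on abstract f-values
def pvAuxLA : List Int → Option Int → Int → Int → Int
  | [], _, k, _ => k
  | v :: t, none, _, j => pvAuxLA t (some v) j (j + 1)
  | v :: t, some b, k, j =>
      if v ≤ b then pvAuxLA t (some v) j (j + 1) else pvAuxLA t (some b) k (j + 1)

def pvAuxMax : List Int → Option Int → Int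
  | [], ans => ans.getD 0
  | v :: t, none => pvAuxMax t (some v)
  | v :: t, some b => if v > b then pvAuxMax t (some v) else pvAuxMax t (some b)

theorem pvArgminLoop_abs : ∀ (r0 r1 : List Int), r0.length = r1.length →
    ∀ (best : Option Int) (k pre j : Int),
    pvArgminLoop (r0.zip (pvSuf r1)) best k pre j = pvAuxLA ((pvF r0 r1).map (pre + ·)) best k j := by
  intro r0
  induction r0 with
  | nil => intro r1 _ best k pre j; simp [pvArgminLoop, pvF, pvAuxLA]
  | cons a r0 ih =>
    intro r1 hlen best k pre j
    cases r1 with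
    | nil => simp at hlen
    | cons b r1 =>
      have hlen' : r0.length = r1.length := by simpa using hlen
      have hF : pvF (a :: r0) (b :: r1) = (a + b + r1.sum) :: (pvF r0 r1).map (a + ·) := rfl
      have hmm : ((pvF r0 r1).map (a + ·)).map (pre + ·) = (pvF r0 r1).map ((pre + a) + ·) := by
        simp [List.map_map, Function.comp_def, add_assoc]
      have hv : pre + a + (b + r1.sum) = pre + (a + b + r1.sum) := by ring
      rw [pvSuf_cons, hF]
      simp only [List.zip_cons_cons, List.map_cons]
      cases best with
      | none =>
        simp only [pvArgminLoop, pvAuxLA]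
        rw [ih r1 hlen' _ _ _ _, hv, hmm]
      | some bb =>
        simp only [pvArgminLoop, pvAuxLA, hv]
        split_ifs <;> rw [ih r1 hlen' _ _ _ _, hmm]

theorem pvMaxLoopB_abs : ∀ (r0 r1 : List Int), r0.length = r1.length →
    ∀ (ans : Option Int) (pre : Int),
    pvMaxLoopB (r0.zip (pvSuf r1)) ans pre = pvAuxMax ((pvF r0 r1).map (pre + ·)) ans := by
  intro r0
  induction r0 with
  | nil => intro r1 _ ans pre; simp [pvMaxLoopB, pvF, pvAuxMax]
  | cons a r0 ih =>
    intro r1 hlen ans pre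
    cases r1 with
    | nil => simp at hlen
    | cons b r1 =>
      have hlen' : r0.length = r1.length := by simpa using hlen
      have hF : pvF (a :: r0) (b :: r1) = (a + b + r1.sum) :: (pvF r0 r1).map (a + ·) := rfl
      have hmm : ((pvF r0 r1).map (a + ·)).map (pre + ·) = (pvF r0 r1).map ((pre + a) + ·) := by
        simp [List.map_map, Function.comp_def, add_assoc]
      have hv : pre + a + (b + r1.sum) = pre + (a + b + r1.sum) := by ring
      rw [pvSuf_cons, hF]
      simp only [List.zip_cons_cons, List.map_cons]
      cases ans with
      | none =>
        simp only [pvMaxLoopB, pvAuxMax]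
        rw [ih r1 hlen' _ _, hv, hmm]
      | some bb =>
        simp only [pvMaxLoopB, pvAuxMax, hv]
        split_ifs <;> rw [ih r1 hlen' _ _, hmm]

theorem pvAuxLA_some : ∀ (l : List Int), l ≠ [] → ∀ (b k j : Int),
    pvAuxLA l (some b) k j = if pvMinL l ≤ b then j + pvLA l else k := by
  intro l
  induction l with
  | nil => simp
  | cons x xs ih =>
    intro _ b k j
    cases xs with
    | nil =>
      simp only [pvAuxLA, pvMinL, pvLA]
      split_ifs <;> simp
    | cons y ys =>
      have ihs := ih (by simp)
      have step : pvAuxLA (x :: y :: ys) (some b) k j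
          = if x ≤ b then pvAuxLA (y :: ys) (some x) j (j + 1)
            else pvAuxLA (y :: ys) (some b) k (j + 1) := rfl
      rw [step, pvMinL_cons x _ (by simp), pvLA_cons x _ (by simp)]
      by_cases hxb : x ≤ b
      · rw [if_pos hxb, ihs]
        by_cases h2 : pvMinL (y :: ys) ≤ x
        · rw [if_pos h2, if_pos (by omega), if_neg (by omega)]
          push_cast
          ring
        · rw [if_neg h2, if_pos (by omega), if_pos (by omega)]
          simp
      · rw [if_neg hxb, ihs]
        by_cases h2 : pvMinL (y :: ys) ≤ b
        · rw [if_pos h2, if_pos (by omega), if_neg (by omega)]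
          push_cast
          ring
        · rw [if_neg h2, if_neg (by omega)]

theorem pvAuxLA_none : ∀ (l : List Int), l ≠ [] → ∀ (k j : Int),
    pvAuxLA l none k j = j + pvLA l := by
  intro l hne k j
  cases l with
  | nil => exact absurd rfl hne
  | cons x xs =>
    show pvAuxLA xs (some x) j (j + 1) = j + pvLA (x :: xs)
    cases xs with
    | nil => simp [pvAuxLA, pvLA]
    | cons y ys =>
      rw [pvAuxLA_some _ (by simp), pvLA_cons x _ (by simp)]
      by_cases h : pvMinL (y :: ys) ≤ x
      · rw [if_pos h, if_neg (by omega)]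
        push_cast
        ring
      · rw [if_neg h, if_pos (by omega)]
        simp

theorem pvAuxMax_some : ∀ (l : List Int), l ≠ [] → ∀ (b : Int),
    pvAuxMax l (some b) = max b (pvMaxL l) := by
  intro l
  induction l with
  | nil => simp
  | cons x xs ih =>
    intro _ b
    cases xs with
    | nil =>
      simp only [pvAuxMax, pvMaxL]
      split_ifs <;> simp [Option.getD] <;> omega
    | cons y ys =>
      have ihs := ih (by simp)
      have step : pvAuxMax (x :: y :: ys) (some b)
          = if x > b then pvAuxMax (y :: ys) (some x) else pvAuxMax (y :: ys) (some b) := rfl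
      rw [step, pvMaxL_cons x _ (by simp)]
      split_ifs <;> rw [ihs] <;> omega

theorem pvAuxMax_none : ∀ (l : List Int), l ≠ [] → pvAuxMax l none = pvMaxL l := by
  intro l hne
  cases l with
  | nil => exact absurd rfl hne
  | cons x xs =>
    show pvAuxMax xs (some x) = pvMaxL (x :: xs)
    cases xs with
    | nil => simp [pvAuxMax, pvMaxL]
    | cons y ys =>
      rw [pvAuxMax_some _ (by simp), pvMaxL_cons x _ (by simp)]

-- ===== VERDICT (by name: the statement is the Claim_ definition above) =====
theorem candy_maze_spec : Claim_equal_candy_maze := by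
  unfold Claim_equal_candy_maze
  intro cm _ hpre
  unfold Spec_candy_maze
  cases cm with
  | nil => rfl
  | cons row0 rest =>
    cases row0 with
    | nil => rfl
    | cons a0 r0t =>
      unfold Pre_candy_maze at hpre
      simp only [List.headD_cons, List.tail_cons, reduceCtorEq, false_or] at hpre
      obtain ⟨hne, hlen⟩ := hpre
      cases rest with
      | nil => exact absurd rfl hne
      | cons row1 rest' =>
        simp only [List.headD_cons] at hlen
        -- abbreviations
        have hr1 : (row1.take (a0 :: r0t).length).length = (a0 :: r0t).length := by
          rw [List.length_take]
          simp only [List.length_cons] at hlen ⊢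
          omega
        have hlen0 : (a0 :: r0t).length = (row1.take (a0 :: r0t).length).length := hr1.symm
        have hFlen : (pvF (a0 :: r0t) (row1.take (a0 :: r0t).length)).length
            = (a0 :: r0t).length := pvF_length _ _ hlen0
        have hFne : pvF (a0 :: r0t) (row1.take (a0 :: r0t).length) ≠ [] :=
          pvF_ne_nil _ _ hlen0 (by simp)
        have hk : pvLA (pvF (a0 :: r0t) (row1.take (a0 :: r0t).length))
            < (a0 :: r0t).length := by
          have := pvLA_lt_length _ hFne
          omega
        simp only [candy_maze, candy_maze_alt, List.headD_cons]
        rw [pvMinDP_spec _ _ hlen0 (by simp), pvMark_spec _ _ hlen0 (by simp)]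
        rw [pvArgminLoop_abs _ _ hlen0 none 0 0 0]
        have hmap0 : ∀ (l : List Int), l.map (fun x => (0 : Int) + x) = l := by
          intro l; simp
        rw [hmap0, pvAuxLA_none _ hFne 0 0]
        -- the two k's coincide
        set k := pvLA (pvF (a0 :: r0t) (row1.take (a0 :: r0t).length)) with hkdef
        have hkt : ((0 : Int) + (k : Int)).toNat = k := by simp
        rw [hkt]
        -- the two zeroed maps coincide
        rw [hr1]
        -- compute both sides through pvFindMax / pvMaxLoopB
        have hs0len : (List.replicate (k + 1) (0 : Int) ++ (a0 :: r0t).drop (k + 1)).length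
            = (a0 :: r0t).length := by
          rw [List.length_append, List.length_replicate, List.length_drop]
          simp only [List.length_cons] at hk ⊢
          omega
        have hs1len : ((row1.take (a0 :: r0t).length).take k
              ++ List.replicate ((a0 :: r0t).length - k) (0 : Int)).length
            = (a0 :: r0t).length := by
          rw [List.length_append, List.length_take, List.length_replicate, hr1]
          simp only [List.length_cons] at hk ⊢
          omega
        have hslen : (List.replicate (k + 1) (0 : Int) ++ (a0 :: r0t).drop (k + 1)).length
            = ((row1.take (a0 :: r0t).length).take k
              ++ List.replicate ((a0 :: r0t).length - k) (0 : Int)).length := by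
          rw [hs0len, hs1len]
        have hs0ne : (List.replicate (k + 1) (0 : Int) ++ (a0 :: r0t).drop (k + 1)) ≠ [] := by
          intro hc
          have := congrArg List.length hc
          rw [hs0len] at this
          simp at this
        rw [pvFindMax_spec _ _ hslen hs0ne, pvMaxLoopB_abs _ _ hslen none 0, hmap0,
            pvAuxMax_none _ (pvF_ne_nil _ _ hslen hs0ne)]
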